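-- pv_equiv track=rewrite | github.com/BronBron-Commits/dw-auth-stream-analysis | tools/stream_diff.py | diff_ranges
-- ===== SOURCE A (Python) =====
-- def diff_ranges(a, b):
--     ranges = []
--     i = 0
--     n = min(len(a), len(b))
--     while i < n:
--         if a[i] != b[i]:
--             start = i
--             while i < n and a[i] != b[i]:
--                 i += 1
--             ranges.append((start, i - 1))
--         else:
--             i += 1
--     if len(a) != len(b):
--         ranges.append((n, max(len(a), len(b)) - 1))
--     return ranges
-- ===== SOURCE B (Python) =====
-- def diff_ranges(a, b):
--     n = min(len(a), len(b))
--     # Phase 1: positions over the common prefix where the sequences differ.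
--     diffs = [i for i in range(n) if a[i] != b[i]]
--     # Phase 2: group consecutive positions into inclusive (start, end) ranges.
--     ranges = []
--     for i in diffs:
--         if ranges and ranges[-1][1] == i - 1:
--             ranges[-1] = (ranges[-1][0], i)
--         else:
--             ranges.append((i, i))
--     # Trailing length-mismatch range, kept separate as in the original.
--     if len(a) != len(b):
--         ranges.append((n, max(len(a), len(b)) - 1))
--     return ranges
-- ===== Notes on version B (the rewrite author's own statement) =====
-- stated objective: alternative
-- what changed: Replaced A's nested while loops (inner loop scanning each run) by a two-phase decomposition: first collect all differing indices over the common prefix with a comprehension, then group consecutive indices into inclusive ranges with a single fold that extends or starts the last range.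
import Mathlib
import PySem

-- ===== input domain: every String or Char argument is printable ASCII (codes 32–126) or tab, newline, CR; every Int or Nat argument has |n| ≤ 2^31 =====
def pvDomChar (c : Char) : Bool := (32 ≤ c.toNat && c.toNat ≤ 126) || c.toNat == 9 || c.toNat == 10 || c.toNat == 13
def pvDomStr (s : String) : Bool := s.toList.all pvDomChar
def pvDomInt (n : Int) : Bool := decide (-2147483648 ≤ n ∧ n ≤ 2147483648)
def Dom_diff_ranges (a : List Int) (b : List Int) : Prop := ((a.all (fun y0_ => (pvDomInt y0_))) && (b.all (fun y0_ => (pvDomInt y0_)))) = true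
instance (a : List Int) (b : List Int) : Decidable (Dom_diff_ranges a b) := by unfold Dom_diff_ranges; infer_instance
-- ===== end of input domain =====

-- B replaces A's nested while loops by a two-phase decomposition (collect differing
-- indices, then group consecutive ones with a fold); alternative, same cost.

-- ===== PORT A =====
-- the test `a[i] != b[i]` (indices are in range when i < min len, so pyGet? is some)
def pvDff (a b : List Int) (i : Nat) : Bool :=
  PySem.List.pyGet? a (i : Int) != PySem.List.pyGet? b (i : Int)

-- inner while loop: `while i < n and a[i] != b[i]: i += 1`, returns the final i
def pvInner (a b : List Int) (n i : Nat) : Nat :=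
  if i < n ∧ pvDff a b i then pvInner a b n (i + 1) else i
  termination_by n - i
  decreasing_by omega

theorem pvInner_ge (a b : List Int) (n i : Nat) : i ≤ pvInner a b n i := by
  unfold pvInner
  split
  · have := pvInner_ge a b n (i + 1); omega
  · exact le_refl i
  termination_by n - i
  decreasing_by rename_i h; omega

-- outer while loop of A
def pvOuter (a b : List Int) (n i : Nat) : List (Int × Int) :=
  if h : i < n then
    if hd : pvDff a b i then
      -- start = i; inner loop advances i; append (start, i - 1)
      let j := pvInner a b n i
      ((i : Int), (j : Int) - 1) :: pvOuter a b n j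
    else
      pvOuter a b n (i + 1)
  else []
  termination_by n - i
  decreasing_by
  · have h1 : pvInner a b n i = pvInner a b n (i + 1) := by
      rw [pvInner]; simp [h, hd]
    have := pvInner_ge a b n (i + 1)
    simp only [h1]; omega
  · omega

def diff_ranges (a : List Int) (b : List Int) : List (Int × Int) :=
  let n := min a.length b.length
  pvOuter a b n 0 ++
    (if a.length ≠ b.length then [((n : Int), (max a.length b.length : Int) - 1)] else [])

-- ===== PORT B =====
-- fold step: extend the last range when the index is adjacent, else start a new one
def pvStep (rs : List (Int × Int)) (i : Nat) : List (Int × Int) :=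
  match rs.getLast? with
  | some (s, e) => if e == (i : Int) - 1 then rs.dropLast ++ [(s, (i : Int))]
                   else rs ++ [((i : Int), (i : Int))]
  | none => [((i : Int), (i : Int))]

def diff_ranges_alt (a : List Int) (b : List Int) : List (Int × Int) :=
  let n := min a.length b.length
  let diffs := (List.range n).filter (fun i => pvDff a b i)
  let rs := diffs.foldl pvStep []
  if a.length ≠ b.length then rs ++ [((n : Int), (max a.length b.length : Int) - 1)] else rs

-- ===== PRECONDITION & SPEC =====
def Spec_diff_ranges (a : List Int) (b : List Int) (out : List (Int × Int)) : Prop := out = diff_ranges_alt a b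
instance (a : List Int) (b : List Int) (out : List (Int × Int)) : Decidable (Spec_diff_ranges a b out) := by unfold Spec_diff_ranges; infer_instance

-- ===== CLAIM (what is proved, stated in full; the proofs are below) =====
def Claim_equal_diff_ranges : Prop := ∀ (a : List Int) (b : List Int), Dom_diff_ranges a b → Spec_diff_ranges a b (diff_ranges a b)

-- ===== LEMMAS AND PROOFS =====

theorem pvStep_ne_nil (rs : List (Int × Int)) (i : Nat) : pvStep rs i ≠ [] := by
  unfold pvStep
  rcases h : rs.getLast? with _ | ⟨s, e⟩ <;> simp
  split <;> simp

-- evaluating pvStep when the last range is known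
theorem pvStep_eq_some (rs : List (Int × Int)) (i : Nat) (s e : Int)
    (h : rs.getLast? = some (s, e)) :
    pvStep rs i = if e == (i : Int) - 1 then rs.dropLast ++ [(s, (i : Int))]
                  else rs ++ [((i : Int), (i : Int))] := by
  unfold pvStep; rw [h]

-- pvStep only looks at / rewrites the last element: a nonempty suffix absorbs it
theorem pvStep_append (rs rs' : List (Int × Int)) (h : rs' ≠ []) (i : Nat) :
    pvStep (rs ++ rs') i = rs ++ pvStep rs' i := by
  rcases hg : rs'.getLast? with _ | ⟨s, e⟩
  · exact absurd (List.getLast?_eq_none_iff.mp hg) h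
  · rw [pvStep_eq_some (rs ++ rs') i s e
        (by rw [List.getLast?_append_of_ne_nil rs h, hg]),
      pvStep_eq_some rs' i s e hg]
    split
    · rw [List.dropLast_append_of_ne_nil h, List.append_assoc]
    · rw [List.append_assoc]

theorem foldl_pvStep_prefix (ds : List Nat) (rs rs' : List (Int × Int)) (h : rs' ≠ []) :
    ds.foldl pvStep (rs ++ rs') = rs ++ ds.foldl pvStep rs' := by
  induction ds generalizing rs' with
  | nil => simp
  | cons x ds ih =>
      simp only [List.foldl_cons]
      rw [pvStep_append rs rs' h x, ih _ (pvStep_ne_nil rs' x)]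

-- folding a consecutive run starting right after the last range's end extends it
theorem foldl_pvStep_run (m : Nat) (s : Int) (i : Nat) :
    (List.range' i m).foldl pvStep [(s, (i : Int) - 1)] = [(s, (i : Int) + m - 1)] := by
  induction m generalizing i with
  | zero => simp
  | succ m ih =>
      rw [List.range'_succ, List.foldl_cons]
      have hs : pvStep [(s, (i : Int) - 1)] i = [(s, (i : Int))] := by
        unfold pvStep; simp
      rw [hs]
      have : ([(s, (i : Int))] : List (Int × Int)) = [(s, ((i + 1 : Nat) : Int) - 1)] := by
        push_cast; ring_nf
      rw [this, ih (i + 1)]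
      congr 1; push_cast; ring_nf

-- pvInner characterisation
theorem pvInner_spec (a b : List Int) (n i : Nat) (hin : i ≤ n) :
    i ≤ pvInner a b n i ∧ pvInner a b n i ≤ n ∧
    (∀ k, i ≤ k → k < pvInner a b n i → pvDff a b k = true) ∧
    (pvInner a b n i = n ∨ pvDff a b (pvInner a b n i) = false) := by
  unfold pvInner
  split
  · rename_i h
    have ih := pvInner_spec a b n (i + 1) (by omega)
    refine ⟨by omega, ih.2.1, ?_, ih.2.2.2⟩
    intro k hk1 hk2
    rcases Nat.eq_or_lt_of_le hk1 with rfl | hk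
    · exact h.2
    · exact ih.2.2.1 k hk hk2
  · rename_i h
    refine ⟨le_refl i, hin, fun k hk1 hk2 => absurd hk1 (by omega), ?_⟩
    by_cases hi : i < n
    · right
      by_contra hc
      exact h ⟨hi, by simpa using hc⟩
    · left; omega
  termination_by n - i
  decreasing_by rename_i h; omega

-- main loop equivalence: A's outer loop from i equals B's fold over the differing
-- indices in [i, n)
theorem pvOuter_eq_fold (a b : List Int) (n i : Nat) (hin : i ≤ n) :
    pvOuter a b n i = ((List.range' i (n - i)).filter (fun k => pvDff a b k)).foldl pvStep [] := by
  rw [pvOuter]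
  split
  · rename_i h
    have hrange : List.range' i (n - i) = i :: List.range' (i + 1) (n - (i + 1)) := by
      rw [show n - i = (n - (i + 1)) + 1 from by omega, List.range'_succ]
    split
    · rename_i hd
      show ((i : Int), ((pvInner a b n i : Nat) : Int) - 1) :: pvOuter a b n (pvInner a b n i) = _
      obtain ⟨h1, h2, h3, h4⟩ := pvInner_spec a b n i hin
      set j := pvInner a b n i with hj
      have hji : i < j := by
        rcases Nat.eq_or_lt_of_le h1 with he | h'
        · exfalso
          rcases h4 with h4 | h4
          · omega
          · rw [← he] at h4; simp [hd] at h4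
        · exact h'
      -- split [i, n) into the run [i, j) and the rest [j, n)
      have hsplit : List.range' i (n - i) = List.range' i (j - i) ++ List.range' j (n - j) := by
        have hap := List.range'_append (s := i) (m := j - i) (n := n - j) (step := 1)
        rw [show i + 1 * (j - i) = j from by omega,
            show j - i + (n - j) = n - i from by omega] at hap
        exact hap.symm
      rw [hsplit, List.filter_append]
      have hrun : (List.range' i (j - i)).filter (fun k => pvDff a b k) = List.range' i (j - i) := by
        apply List.filter_eq_self.mpr
        intro k hk
        obtain ⟨m, hm1, hm2⟩ := List.mem_range'.mp hk
        exact h3 _ (by omega) (by omega)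
      rw [hrun]
      -- fold the run: the first differing index opens a fresh range, the rest extend it
      rw [show j - i = (j - i - 1) + 1 from by omega, List.range'_succ,
          List.cons_append, List.foldl_cons,
          show pvStep [] i = [((i : Int), (i : Int))] from by unfold pvStep; simp,
          List.foldl_append,
          show ([((i : Int), (i : Int))] : List (Int × Int))
              = [((i : Int), ((i + 1 : Nat) : Int) - 1)] from by push_cast; ring_nf,
          foldl_pvStep_run (j - i - 1) (i : Int) (i + 1)]
      have hend : ((i : Int), ((i + 1 : Nat) : Int) + ((j - i - 1 : Nat) : Int) - 1)
          = ((i : Int), (j : Int) - 1) := by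
        congr 1
        omega
      rw [hend]
      have hrest := pvOuter_eq_fold a b n j h2
      rcases h4 with h4 | h4
      · -- j = n: nothing remains after the run
        rw [h4]
        have hnn : pvOuter a b n n = [] := by rw [pvOuter]; simp
        rw [h4] at hrest
        simp [hnn]
      · -- a[j] = b[j]: the rest's first differing index is ≥ j + 1, so it cannot merge
        rcases hcase : (List.range' j (n - j)).filter (fun k => pvDff a b k) with _ | ⟨x, rest⟩
        · simp [hrest, hcase]
        · have hx : x ∈ (List.range' j (n - j)).filter (fun k => pvDff a b k) := by
            rw [hcase]; exact List.mem_cons_self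
          have hxmem := List.mem_filter.mp hx
          have hxj : j < x := by
            have hge : j ≤ x := by
              obtain ⟨m, _, hm⟩ := List.mem_range'.mp hxmem.1; omega
            rcases Nat.eq_or_lt_of_le hge with rfl | h' 
            · exact absurd hxmem.2 (by simp [h4])
            · exact h'
          rw [List.foldl_cons]
          have hnomerge : pvStep [((i : Int), (j : Int) - 1)] x
              = [((i : Int), (j : Int) - 1)] ++ [((x : Int), (x : Int))] := by
            unfold pvStep
            simp only [List.getLast?_singleton]
            have hne : ¬ ((j : Int) - 1 = (x : Int) - 1) := by
              intro hc
              have hjx : (j : Int) = (x : Int) := by omega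
              exact absurd (by exact_mod_cast hjx) (by omega)
            simp [hne]
          rw [hnomerge,
            foldl_pvStep_prefix rest [((i : Int), (j : Int) - 1)] [((x : Int), (x : Int))] (by simp)]
          rw [hrest, hcase, List.foldl_cons,
            show pvStep [] x = [((x : Int), (x : Int))] from by unfold pvStep; simp]
          rfl
    · rename_i hd
      rw [hrange, List.filter_cons]
      simp only [hd, Bool.false_eq_true, if_false]
      exact pvOuter_eq_fold a b n (i + 1) (by omega)
  · rename_i h
    simp [show n - i = 0 from by omega]
  termination_by n - i
  decreasing_by all_goals omega

-- ===== VERDICT (by name: the statement is the Claim_ definition above) =====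
theorem diff_ranges_spec : Claim_equal_diff_ranges := by
  intro a b _
  show diff_ranges a b = diff_ranges_alt a b
  simp only [diff_ranges, diff_ranges_alt, List.range_eq_range']
  have h := pvOuter_eq_fold a b (min a.length b.length) 0 (Nat.zero_le _)
  rw [Nat.sub_zero] at h
  rw [h]
  split <;> simp
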